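-- pv_equiv track=rewrite | github.com/boutproject/xBOUT | xbout/tests/test_load.py | _create_filepaths
-- ===== SOURCE A (Python) =====
-- def _create_filepaths(nxpe=1, nype=1, nt=1):
--     filepaths = []
--     for t in range(nt):
--         for i in range(nype):
--             for j in range(nxpe):
--                 file_num = j + nxpe * i
--                 path = "./run{}".format(str(t)) + "/BOUT.dmp.{}.nc".format(
--                     str(file_num)
--                 )
--                 filepaths.append(path)
--
--     return filepaths
-- ===== SOURCE B (Python) =====
-- def _create_filepaths(nxpe=1, nype=1, nt=1):
--     # No timesteps: nothing to list (and no point building the suffix table).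
--     if nt <= 0:
--         return []
--     # Build the per-timestep suffix list once (it does not depend on t),
--     # then prefix each timestep directory onto it.
--     suffixes = [
--         "/BOUT.dmp.{}.nc".format(str(j + nxpe * i))
--         for i in range(nype)
--         for j in range(nxpe)
--     ]
--     return [
--         "./run{}".format(str(t)) + suffix
--         for t in range(nt)
--         for suffix in suffixes
--     ]
-- ===== Notes on version B (the rewrite author's own statement) =====
-- stated objective: simpler
-- what changed: The per-timestep filename suffixes are computed once before the t loop (they do not depend on t) and the result is built by two flat comprehensions instead of a triple-nested append loop; nt<=0 returns [] immediately.
import Mathlib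
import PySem

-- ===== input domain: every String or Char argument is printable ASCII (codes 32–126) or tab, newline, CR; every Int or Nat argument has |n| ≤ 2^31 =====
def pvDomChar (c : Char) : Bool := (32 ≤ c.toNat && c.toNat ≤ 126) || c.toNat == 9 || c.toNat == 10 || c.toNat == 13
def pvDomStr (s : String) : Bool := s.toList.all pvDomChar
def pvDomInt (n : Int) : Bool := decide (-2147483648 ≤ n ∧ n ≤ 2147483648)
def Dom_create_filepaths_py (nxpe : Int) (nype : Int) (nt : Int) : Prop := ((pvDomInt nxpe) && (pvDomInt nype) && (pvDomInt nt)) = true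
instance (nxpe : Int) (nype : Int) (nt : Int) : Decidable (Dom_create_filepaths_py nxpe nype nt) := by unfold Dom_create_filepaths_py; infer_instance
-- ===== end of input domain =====

-- ===== PORT A =====
-- B hoists the t-independent suffix list out of the t loop; objective: simpler.
def create_filepaths_py (nxpe : Int) (nype : Int) (nt : Int) : List String :=
  (PySem.List.pyRange 0 nt 1).foldl (fun filepaths t =>
    (PySem.List.pyRange 0 nype 1).foldl (fun filepaths i =>
      (PySem.List.pyRange 0 nxpe 1).foldl (fun filepaths j =>
        let file_num := j + nxpe * i
        let path := ("./run" ++ PySem.Int.toStr t) ++ ("/BOUT.dmp." ++ PySem.Int.toStr file_num ++ ".nc")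
        filepaths ++ [path]) filepaths) filepaths) []

-- ===== PORT B =====
def create_filepaths_py_alt (nxpe : Int) (nype : Int) (nt : Int) : List String :=
  if nt ≤ 0 then [] else
  let suffixes := (PySem.List.pyRange 0 nype 1).flatMap (fun i =>
    (PySem.List.pyRange 0 nxpe 1).map (fun j => "/BOUT.dmp." ++ PySem.Int.toStr (j + nxpe * i) ++ ".nc"))
  (PySem.List.pyRange 0 nt 1).flatMap (fun t =>
    suffixes.map (fun suffix => "./run" ++ PySem.Int.toStr t ++ suffix))

-- ===== PRECONDITION & SPEC =====
def Spec_create_filepaths_py (nxpe : Int) (nype : Int) (nt : Int) (out : List String) : Prop := out = create_filepaths_py_alt nxpe nype nt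
instance (nxpe : Int) (nype : Int) (nt : Int) (out : List String) : Decidable (Spec_create_filepaths_py nxpe nype nt out) := by unfold Spec_create_filepaths_py; infer_instance

-- ===== CLAIM (what is proved, stated in full; the proofs are below) =====
def Claim_equal_create_filepaths_py : Prop := ∀ (nxpe : Int) (nype : Int) (nt : Int), Dom_create_filepaths_py nxpe nype nt → Spec_create_filepaths_py nxpe nype nt (create_filepaths_py nxpe nype nt)

-- ===== LEMMAS AND PROOFS =====

-- ===== VERDICT (by name: the statement is the Claim_ definition above) =====
lemma inner_two (nxpe nype t : Int) (acc : List String) :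
    (PySem.List.pyRange 0 nype 1).foldl (fun filepaths i =>
      (PySem.List.pyRange 0 nxpe 1).foldl (fun filepaths j =>
        filepaths ++ [("./run" ++ PySem.Int.toStr t) ++ ("/BOUT.dmp." ++ PySem.Int.toStr (j + nxpe * i) ++ ".nc")]) filepaths) acc
    = acc ++ ((PySem.List.pyRange 0 nype 1).flatMap (fun i =>
        (PySem.List.pyRange 0 nxpe 1).map (fun j => "/BOUT.dmp." ++ PySem.Int.toStr (j + nxpe * i) ++ ".nc"))).map
        (fun suffix => "./run" ++ PySem.Int.toStr t ++ suffix) := by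
  have h : ∀ i (acc : List String),
      (PySem.List.pyRange 0 nxpe 1).foldl (fun filepaths j =>
        filepaths ++ [("./run" ++ PySem.Int.toStr t) ++ ("/BOUT.dmp." ++ PySem.Int.toStr (j + nxpe * i) ++ ".nc")]) acc
      = acc ++ ((PySem.List.pyRange 0 nxpe 1).map (fun j => "/BOUT.dmp." ++ PySem.Int.toStr (j + nxpe * i) ++ ".nc")).map
          (fun suffix => "./run" ++ PySem.Int.toStr t ++ suffix) := by
    intro i acc
    rw [PySem.List.foldl_append_singleton_eq_map, List.map_map]
    rfl
  calc (PySem.List.pyRange 0 nype 1).foldl (fun filepaths i =>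
        (PySem.List.pyRange 0 nxpe 1).foldl (fun filepaths j =>
          filepaths ++ [("./run" ++ PySem.Int.toStr t) ++ ("/BOUT.dmp." ++ PySem.Int.toStr (j + nxpe * i) ++ ".nc")]) filepaths) acc
      = (PySem.List.pyRange 0 nype 1).foldl (fun filepaths i =>
          filepaths ++ ((PySem.List.pyRange 0 nxpe 1).map (fun j => "/BOUT.dmp." ++ PySem.Int.toStr (j + nxpe * i) ++ ".nc")).map
            (fun suffix => "./run" ++ PySem.Int.toStr t ++ suffix)) acc := by
        apply PySem.List.foldl_congr_mem
        intro filepaths i _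
        exact h i filepaths
    _ = acc ++ (PySem.List.pyRange 0 nype 1).flatMap (fun i =>
          ((PySem.List.pyRange 0 nxpe 1).map (fun j => "/BOUT.dmp." ++ PySem.Int.toStr (j + nxpe * i) ++ ".nc")).map
            (fun suffix => "./run" ++ PySem.Int.toStr t ++ suffix)) :=
        PySem.List.foldl_append_eq_flatMap _ _ _
    _ = _ := by rw [List.map_flatMap]

theorem create_filepaths_py_spec : Claim_equal_create_filepaths_py := by
  intro nxpe nype nt _
  unfold Spec_create_filepaths_py create_filepaths_py create_filepaths_py_alt
  by_cases hnt : nt ≤ 0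
  · simp [hnt, PySem.List.pyRange_one_eq_nil hnt]
  simp only [if_neg hnt]
  calc (PySem.List.pyRange 0 nt 1).foldl (fun filepaths t =>
        (PySem.List.pyRange 0 nype 1).foldl (fun filepaths i =>
          (PySem.List.pyRange 0 nxpe 1).foldl (fun filepaths j =>
            filepaths ++ [("./run" ++ PySem.Int.toStr t) ++ ("/BOUT.dmp." ++ PySem.Int.toStr (j + nxpe * i) ++ ".nc")]) filepaths) filepaths) []
      = (PySem.List.pyRange 0 nt 1).foldl (fun filepaths t =>
          filepaths ++ ((PySem.List.pyRange 0 nype 1).flatMap (fun i =>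
            (PySem.List.pyRange 0 nxpe 1).map (fun j => "/BOUT.dmp." ++ PySem.Int.toStr (j + nxpe * i) ++ ".nc"))).map
            (fun suffix => "./run" ++ PySem.Int.toStr t ++ suffix)) [] := by
        apply PySem.List.foldl_congr_mem
        intro filepaths t _
        exact inner_two nxpe nype t filepaths
    _ = _ := by rw [PySem.List.foldl_append_eq_flatMap]; rfl
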